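-- pv_equiv track=rewrite | github.com/chouathenamo/CINEMRI | dataset.py | select_odd_frames
-- ===== SOURCE A (Python) =====
-- from typing import List, Tuple, Dict, Optional
--
-- def select_odd_frames(
--     total_frames: int,
--     ed_frame: int,
--     es_frame: int,
-- ) -> List[int]:
--     """
--     Select odd-indexed frames from ED (diastole) to ES (systole), inclusive.
--
--     ACDC stores frames as a full cycle. We only want the contraction phase:
--         ED → ES  (diastole → peak systole)
--
--     We then take every other frame (odd indices within this sub-sequence)
--     to reduce temporal redundancy.
--
--     Args:
--         total_frames : total number of frames in the 4D volume
--         ed_frame     : 0-indexed end-diastolic frame (usually frame 0)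
--         es_frame     : 0-indexed end-systolic frame  (usually ~frame 13-15)
--
--     Returns:
--         List of 0-indexed frame indices to use, ordered ED → ES
--     """
--     # Build the forward sequence from ED to ES
--     # Handle wrap-around (rare but possible if ED > ES numerically)
--     if ed_frame <= es_frame:
--         sequence = list(range(ed_frame, es_frame + 1))
--     else:
--         # Wrap around: e.g., ED=28, ES=10 in a 30-frame sequence
--         sequence = list(range(ed_frame, total_frames)) + list(range(0, es_frame + 1))
--
--     # Take odd positions within the subsequence (index 0, 2, 4, ... of the sequence)
--     # This means: sequence[0], sequence[2], sequence[4], ...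
--     # i.e., every other frame starting from the first
--     odd_frames = [sequence[i] for i in range(0, len(sequence), 2)]
--
--     # Ensure we always have at least 2 frames (needed for at least 1 frame pair)
--     if len(odd_frames) < 2:
--         # Fall back to the full sequence if too short
--         odd_frames = sequence[:min(4, len(sequence))]
--
--     return odd_frames
-- ===== SOURCE B (Python) =====
-- def select_odd_frames(total_frames, ed_frame, es_frame):
--     # Compute the strided indices directly with step-2 ranges; no full
--     # ED->ES sequence is materialised except in the short fallback case.
--     if ed_frame <= es_frame:
--         odd_frames = list(range(ed_frame, es_frame + 1, 2))
--         if len(odd_frames) >= 2: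
--             return odd_frames
--         return list(range(ed_frame, es_frame + 1))
--     first_len = max(total_frames - ed_frame, 0)
--     odd_frames = list(range(ed_frame, total_frames, 2)) + \
--                  list(range(first_len % 2, es_frame + 1, 2))
--     if len(odd_frames) >= 2:
--         return odd_frames
--     return list(range(ed_frame, total_frames)) + list(range(0, es_frame + 1))
-- ===== Notes on version B (the rewrite author's own statement) =====
-- stated objective: simpler
-- what changed: B computes the strided frame indices directly with step-2 ranges (continuing the stride parity across the wrap join via (total-ed) mod 2) instead of materialising the full ED→ES sequence and indexing every other element; the full sequence is only built in the short (<2 frames) fallback case.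
import Mathlib
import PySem

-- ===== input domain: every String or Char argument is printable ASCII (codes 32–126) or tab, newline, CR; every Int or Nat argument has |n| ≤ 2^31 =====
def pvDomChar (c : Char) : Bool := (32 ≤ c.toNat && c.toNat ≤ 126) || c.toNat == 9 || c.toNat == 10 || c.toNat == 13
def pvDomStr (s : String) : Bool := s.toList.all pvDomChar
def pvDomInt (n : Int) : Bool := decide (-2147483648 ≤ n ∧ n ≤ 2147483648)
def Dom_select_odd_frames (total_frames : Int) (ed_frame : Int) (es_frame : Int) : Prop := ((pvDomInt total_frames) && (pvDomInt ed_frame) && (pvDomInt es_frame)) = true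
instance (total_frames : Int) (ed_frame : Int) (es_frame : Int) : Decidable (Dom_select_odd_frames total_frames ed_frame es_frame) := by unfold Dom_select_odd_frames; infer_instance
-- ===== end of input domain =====

-- B computes the strided frame indices directly with step-2 ranges instead of
-- materialising the full ED→ES sequence and indexing every other element
-- (objective: simpler/alternative decomposition, same return value).

-- ===== PORT A =====
def select_odd_frames (total_frames : Int) (ed_frame : Int) (es_frame : Int) : List Int :=
  let sequence :=
    if ed_frame ≤ es_frame then
      PySem.List.pyRange ed_frame (es_frame + 1) 1
    else
      PySem.List.pyRange ed_frame total_frames 1 ++ PySem.List.pyRange 0 (es_frame + 1) 1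
  let odd_frames :=
    (PySem.List.pyRange 0 (sequence.length : Int) 2).map (fun i => PySem.List.pyGetD sequence i 0)
  if odd_frames.length < 2 then
    PySem.List.slice sequence none (some (min 4 (sequence.length : Int)))
  else
    odd_frames

-- ===== PORT B =====
def select_odd_frames_alt (total_frames : Int) (ed_frame : Int) (es_frame : Int) : List Int :=
  if ed_frame ≤ es_frame then
    let odd_frames := PySem.List.pyRange ed_frame (es_frame + 1) 2
    if 2 ≤ odd_frames.length then odd_frames
    else PySem.List.pyRange ed_frame (es_frame + 1) 1
  else
    let firstLen := max (total_frames - ed_frame) 0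
    let odd_frames :=
      PySem.List.pyRange ed_frame total_frames 2 ++
      PySem.List.pyRange (PySem.Int.mod firstLen 2) (es_frame + 1) 2
    if 2 ≤ odd_frames.length then odd_frames
    else PySem.List.pyRange ed_frame total_frames 1 ++ PySem.List.pyRange 0 (es_frame + 1) 1

-- ===== PRECONDITION & SPEC =====
def Spec_select_odd_frames (total_frames : Int) (ed_frame : Int) (es_frame : Int) (out : List Int) : Prop := out = select_odd_frames_alt total_frames ed_frame es_frame
instance (total_frames : Int) (ed_frame : Int) (es_frame : Int) (out : List Int) : Decidable (Spec_select_odd_frames total_frames ed_frame es_frame out) := by unfold Spec_select_odd_frames; infer_instance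

-- ===== CLAIM (what is proved, stated in full; the proofs are below) =====
def Claim_equal_select_odd_frames : Prop := ∀ (total_frames : Int) (ed_frame : Int) (es_frame : Int), Dom_select_odd_frames total_frames ed_frame es_frame → Spec_select_odd_frames total_frames ed_frame es_frame (select_odd_frames total_frames ed_frame es_frame)

-- ===== LEMMAS AND PROOFS =====

-- every other element of a list, starting with the first (sequence[::2])
def everyOther : List Int → List Int
  | [] => []
  | [x] => [x]
  | x :: _ :: r => x :: everyOther r

theorem length_everyOther (l : List Int) : (everyOther l).length = (l.length + 1) / 2 := by
  induction l using everyOther.induct with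
  | case1 => simp [everyOther]
  | case2 x => simp [everyOther]
  | case3 x y r ih => simp only [everyOther, List.length_cons, ih]; omega

theorem pyRange_shift (a b s c : Int) :
    PySem.List.pyRange (a + c) (b + c) s = (PySem.List.pyRange a b s).map (· + c) := by
  have hd : b + c - (a + c) = b - a := by ring
  have hd2 : a + c - (b + c) = a - b := by ring
  simp only [PySem.List.pyRange, hd, hd2, add_lt_add_iff_right]
  split_ifs <;>
    first
      | rfl
      | (simp
         all_goals (intros; ring))

theorem pyRange_two_nil {a b : Int} (h : b ≤ a) : PySem.List.pyRange a b 2 = [] := by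
  simp only [PySem.List.pyRange]
  norm_num
  intro h'
  omega

theorem pyRange_two_cons {a b : Int} (h : a < b) :
    PySem.List.pyRange a b 2 = a :: PySem.List.pyRange (a + 2) b 2 := by
  rw [PySem.List.pyRange_of_pos a b (by norm_num),
      PySem.List.pyRange_of_pos (a + 2) b (by norm_num)]
  have hc : (if a < b then ((b - a + 2 - 1) / 2).toNat else 0)
      = (if a + 2 < b then ((b - (a + 2) + 2 - 1) / 2).toNat else 0) + 1 := by
    split_ifs <;> omega
  rw [hc, List.range_succ_eq_map, List.map_cons, List.map_map]
  congr 1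
  · simp
  · exact List.map_congr_left (fun k _ => by simp [Function.comp]; ring)

theorem everyOther_pyRange (a b : Int) :
    everyOther (PySem.List.pyRange a b 1) = PySem.List.pyRange a b 2 := by
  by_cases hab : b ≤ a
  · rw [PySem.List.pyRange_one_eq_nil hab, pyRange_two_nil hab]; rfl
  · rw [not_le] at hab
    have hn : (b - a).toNat ≠ 0 := by omega
    -- strong induction on the length of the range
    clear hn
    have : ∀ n : Nat, ∀ a : Int, (b - a).toNat = n → a < b →
        everyOther (PySem.List.pyRange a b 1) = PySem.List.pyRange a b 2 := by
      intro n
      induction n using Nat.strong_induction_on with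
      | _ n ih =>
        intro a hn hab
        rw [PySem.List.pyRange_one_cons hab, pyRange_two_cons hab]
        by_cases h2 : a + 1 < b
        · rw [PySem.List.pyRange_one_cons h2]
          show a :: everyOther (PySem.List.pyRange (a + 1 + 1) b 1) = _
          by_cases h3 : a + 2 < b
          · have : a + 1 + 1 = a + 2 := by ring
            rw [this, ih ((b - (a + 2)).toNat) (by omega) (a + 2) rfl h3]
          · rw [not_lt] at h3
            have hba : b ≤ a + 1 + 1 := by omega
            rw [PySem.List.pyRange_one_eq_nil hba, pyRange_two_nil (by omega)]
            rfl
        · rw [not_lt] at h2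
          rw [PySem.List.pyRange_one_eq_nil h2, pyRange_two_nil (by omega)]
          rfl
    exact this ((b - a).toNat) a rfl hab

theorem pyGetD_cons_succ (x : Int) (l : List Int) (i : Int) (h : 0 ≤ i) :
    PySem.List.pyGetD (x :: l) (i + 1) 0 = PySem.List.pyGetD l i 0 := by
  obtain ⟨n, rfl⟩ := Int.eq_ofNat_of_zero_le h
  have : (n : Int) + 1 = ((n + 1 : Nat) : Int) := by push_cast; ring
  rw [this, PySem.List.pyGetD_natCast, PySem.List.pyGetD_natCast]
  simp [List.getD]

-- A's comprehension [sequence[i] for i in range(0, len(sequence), 2)] is everyOther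
theorem stride_eq_everyOther (l : List Int) :
    (PySem.List.pyRange 0 (l.length : Int) 2).map (fun i => PySem.List.pyGetD l i 0)
      = everyOther l := by
  induction l using everyOther.induct with
  | case1 => simp [everyOther, pyRange_two_nil]
  | case2 x =>
    rw [show (([x] : List Int).length : Int) = 1 by simp]
    rw [pyRange_two_cons (by norm_num), pyRange_two_nil (by norm_num)]
    simp [everyOther, PySem.List.pyGetD_zero_cons]
  | case3 x y r ih =>
    have hlen : (((x :: y :: r : List Int)).length : Int) = (r.length : Int) + 2 := by
      simp; push_cast; ring
    rw [hlen, pyRange_two_cons (by positivity), pyRange_shift 0 (r.length : Int) 2 2,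
        List.map_cons, List.map_map]
    show _ :: List.map _ _ = x :: everyOther r
    congr 1
    · simp [PySem.List.pyGetD_zero_cons]
    · rw [← ih]
      refine List.map_congr_left (fun i hi => ?_)
      have h0 : 0 ≤ i := by
        have := (PySem.List.mem_pyRange_iff_of_pos (by norm_num : (0:Int) < 2) i).mp hi
        omega
      simp only [Function.comp]
      have e1 : i + 2 = (i + 1) + 1 := by ring
      rw [e1, pyGetD_cons_succ x _ (i + 1) (by omega), pyGetD_cons_succ y _ i h0]

-- parity split of everyOther over an append
theorem everyOther_append (l1 l2 : List Int) :
    everyOther (l1 ++ l2)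
      = everyOther l1 ++ (if l1.length % 2 = 0 then everyOther l2 else everyOther l2.tail) := by
  induction l1 using everyOther.induct with
  | case1 => simp [everyOther]
  | case2 x =>
    cases l2 with
    | nil => simp [everyOther]
    | cons h t => simp [everyOther]
  | case3 x y r ih =>
    show x :: everyOther (r ++ l2) = x :: everyOther r ++ _
    rw [ih]
    simp only [List.cons_append]
    congr 1
    have : (x :: y :: r : List Int).length % 2 = r.length % 2 := by simp; omega
    rw [this]

theorem everyOther_tail_pyRange_zero (b : Int) :
    everyOther (PySem.List.pyRange 0 b 1).tail = PySem.List.pyRange 1 b 2 := by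
  by_cases hb : 0 < b
  · rw [PySem.List.pyRange_one_cons hb]
    exact everyOther_pyRange 1 b
  · rw [PySem.List.pyRange_one_eq_nil (by omega), pyRange_two_nil (by omega)]
    rfl

theorem take_min_four (l : List Int) (h : l.length ≤ 3) :
    PySem.List.slice l none (some (min 4 (l.length : Int))) = l := by
  have hm : min 4 (l.length : Int) = (l.length : Int) := by omega
  rw [hm, PySem.List.slice_to]
  · simp
  · positivity

-- the strided list of A equals the strided list of B, in each branch
theorem odd_eq_nonwrap (ed es : Int) (_h : ed ≤ es) :
    (PySem.List.pyRange 0 ((PySem.List.pyRange ed (es + 1) 1).length : Int) 2).map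
        (fun i => PySem.List.pyGetD (PySem.List.pyRange ed (es + 1) 1) i 0)
      = PySem.List.pyRange ed (es + 1) 2 := by
  rw [stride_eq_everyOther, everyOther_pyRange]

theorem odd_eq_wrap (total ed es : Int) (_h : ¬ ed ≤ es) :
    (PySem.List.pyRange 0
        (((PySem.List.pyRange ed total 1 ++ PySem.List.pyRange 0 (es + 1) 1)).length : Int) 2).map
        (fun i => PySem.List.pyGetD (PySem.List.pyRange ed total 1 ++ PySem.List.pyRange 0 (es + 1) 1) i 0)
      = PySem.List.pyRange ed total 2 ++
        PySem.List.pyRange (PySem.Int.mod (max (total - ed) 0) 2) (es + 1) 2 := by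
  rw [stride_eq_everyOther, everyOther_append, everyOther_pyRange]
  congr 1
  have hlen : (PySem.List.pyRange ed total 1).length = (total - ed).toNat :=
    PySem.List.length_pyRange_one ed total
  have hmod : PySem.Int.mod (max (total - ed) 0) 2 = ((total - ed).toNat % 2 : Nat) := by
    rw [PySem.Int.mod_eq_emod_of_pos (by norm_num)]
    omega
  by_cases hp : (PySem.List.pyRange ed total 1).length % 2 = 0
  · rw [if_pos hp, everyOther_pyRange]
    have : PySem.Int.mod (max (total - ed) 0) 2 = 0 := by rw [hmod]; rw [hlen] at hp; omega
    rw [this]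
  · rw [if_neg hp, everyOther_tail_pyRange_zero]
    have : PySem.Int.mod (max (total - ed) 0) 2 = 1 := by
      rw [hmod]; rw [hlen] at hp; omega
    rw [this]

-- ===== VERDICT (by name: the statement is the Claim_ definition above) =====
theorem select_odd_frames_spec : Claim_equal_select_odd_frames := by
  intro total ed es _
  unfold Spec_select_odd_frames select_odd_frames select_odd_frames_alt
  by_cases h : ed ≤ es
  · simp only [if_pos h]
    rw [odd_eq_nonwrap ed es h]
    set seq := PySem.List.pyRange ed (es + 1) 1 with hseq
    set odd := PySem.List.pyRange ed (es + 1) 2 with hodd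
    have hlen : odd.length = (seq.length + 1) / 2 := by
      rw [hodd, ← everyOther_pyRange, length_everyOther, hseq]
    by_cases h2 : odd.length < 2
    · rw [if_pos h2, if_neg (by omega)]
      exact take_min_four seq (by omega)
    · rw [if_neg h2, if_pos (by omega)]
  · simp only [if_neg h]
    rw [odd_eq_wrap total ed es h]
    set seq := PySem.List.pyRange ed total 1 ++ PySem.List.pyRange 0 (es + 1) 1 with hseq
    set odd := PySem.List.pyRange ed total 2 ++
        PySem.List.pyRange (PySem.Int.mod (max (total - ed) 0) 2) (es + 1) 2 with hodd
    have hlen : odd.length = (seq.length + 1) / 2 := by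
      rw [hodd, ← odd_eq_wrap total ed es h, stride_eq_everyOther, length_everyOther, hseq]
    by_cases h2 : odd.length < 2
    · rw [if_pos h2, if_neg (by omega)]
      exact take_min_four seq (by omega)
    · rw [if_neg h2, if_pos (by omega)]
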